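-- pv_equiv track=rewrite | github.com/Muzsy/VRS_nesting | api/services/dxf_preflight_diagnostics_renderer.py | _derive_code
-- ===== SOURCE A (Python) =====
-- def _derive_code(source: str, family: str) -> str:
--     raw = f"{source}_{family}".upper()
--     out = []
--     for char in raw:
--         if char.isalnum():
--             out.append(char)
--         else:
--             out.append("_")
--     code = "".join(out)
--     while "__" in code:
--         code = code.replace("__", "_")
--     return code.strip("_") or "UNSPECIFIED"
-- ===== SOURCE B (Python) =====
-- def _derive_code(source: str, family: str) -> str:
--     raw = f"{source}_{family}".upper()
--     tokens = []
--     cur = []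
--     for ch in raw:
--         if ch.isalnum():
--             cur.append(ch)
--         elif cur:
--             tokens.append("".join(cur))
--             cur = []
--     if cur:
--         tokens.append("".join(cur))
--     return "_".join(tokens) or "UNSPECIFIED"
-- ===== Notes on version B (the rewrite author's own statement) =====
-- stated objective: simpler
-- what changed: B tokenizes the uppercased string in a single pass (accumulate alnum runs, flush on separators) and joins the tokens with '_', replacing A's per-char substitution into a list, repeated '__'->'_' replace loop, and final strip('_').
import Mathlib
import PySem

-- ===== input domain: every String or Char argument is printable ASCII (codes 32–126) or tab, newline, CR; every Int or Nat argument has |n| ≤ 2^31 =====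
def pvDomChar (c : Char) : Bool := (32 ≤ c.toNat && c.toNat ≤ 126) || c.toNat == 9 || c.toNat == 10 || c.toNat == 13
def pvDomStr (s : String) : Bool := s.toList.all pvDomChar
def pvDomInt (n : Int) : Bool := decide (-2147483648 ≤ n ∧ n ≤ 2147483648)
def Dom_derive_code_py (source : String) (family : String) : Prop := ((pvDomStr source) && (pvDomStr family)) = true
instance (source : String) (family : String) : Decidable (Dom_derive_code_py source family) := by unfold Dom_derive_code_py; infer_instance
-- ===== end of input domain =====

-- B re-implements A's sanitizer as a single-pass run tokenizer joined with "_"; equivalence is proved for all inputs (return values only).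

-- ===== PORT A =====
-- helper facts needed by pvCollapse's termination (cited in decreasing_by): one
-- pass of code.replace("__","_") is pvRep, which strictly shrinks while "__" occurs.
def pvRep : List Char → List Char
  | [] => []
  | [c] => [c]
  | a :: b :: t => if a = '_' ∧ b = '_' then '_' :: pvRep t else a :: pvRep (b :: t)

theorem pvRep_len_le (s : List Char) : (pvRep s).length ≤ s.length := by
  induction s using pvRep.induct with
  | case1 => simp [pvRep]
  | case2 c => simp [pvRep]
  | case3 a b t hab ih => have := ih; simp only [pvRep, if_pos hab, List.length_cons] at this ⊢; omega
  | case4 a b t hab ih => have := ih; simp only [pvRep, if_neg hab, List.length_cons] at this ⊢; omega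

theorem pvGo_eq (fuel : Nat) : ∀ (l acc : List Char), l.length ≤ fuel →
    PySem.Chars.replace.go ['_','_'] ['_'] fuel l acc = acc.reverse ++ pvRep l := by
  induction fuel with
  | zero =>
    intro l acc h
    have hl : l = [] := List.eq_nil_of_length_eq_zero (Nat.le_zero.mp h)
    subst hl
    simp [PySem.Chars.replace.go, pvRep]
  | succ n ih =>
    intro l acc h
    cases l with
    | nil => simp [PySem.Chars.replace.go, pvRep]
    | cons a t =>
      cases t with
      | nil =>
        have hpre : List.isPrefixOf ['_','_'] [a] = false := by
          simp [List.isPrefixOf]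
        simp only [PySem.Chars.replace.go, hpre, Bool.false_eq_true, if_false]
        rw [ih [] (a :: acc) (by simp)]
        simp [pvRep]
      | cons b t =>
        by_cases hab : a = '_' ∧ b = '_'
        · obtain ⟨rfl, rfl⟩ := hab
          have hpre : List.isPrefixOf ['_','_'] ('_' :: '_' :: t) = true := by
            simp [List.isPrefixOf]
          simp only [PySem.Chars.replace.go, hpre, if_true]
          rw [show List.drop (['_','_'] : List Char).length ('_' :: '_' :: t) = t from rfl]
          rw [ih t (['_'].reverse ++ acc) (by have := h; simp only [List.length_cons] at this; omega)]
          simp [pvRep]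
        · have hpre : List.isPrefixOf ['_','_'] (a :: b :: t) = false := by
            rcases not_and_or.mp hab with hA | hB
            · simp [List.isPrefixOf]; intro hh; exact absurd hh.symm hA
            · simp [List.isPrefixOf]; intro _ hh; exact absurd hh.symm hB
          simp only [PySem.Chars.replace.go, hpre, Bool.false_eq_true, if_false]
          rw [ih (b :: t) (a :: acc) (by have := h; simp only [List.length_cons] at this ⊢; omega)]
          simp [pvRep, hab]

theorem pvReplace_eq_rep (s : List Char) :
    PySem.Chars.replace s ['_','_'] ['_'] = pvRep s := by
  rw [PySem.Chars.replace]
  simp only [List.isEmpty_cons, Bool.false_eq_true, if_false]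
  simpa using pvGo_eq s.length s [] le_rfl

theorem pvRep_len_lt (s : List Char) (h : ['_','_'] <:+: s) :
    (pvRep s).length < s.length := by
  induction s using pvRep.induct with
  | case1 =>
    have := h.length_le
    simp only [List.length_cons, List.length_nil] at this
    omega
  | case2 c =>
    have := h.length_le
    simp only [List.length_cons, List.length_nil] at this
    omega
  | case3 a b t hab ih =>
    have := pvRep_len_le t
    simp only [pvRep, if_pos hab, List.length_cons]
    omega
  | case4 a b t hab ih =>
    have hbt : ['_','_'] <:+: b :: t := by
      rcases List.infix_cons_iff.mp h with hp | hi
      · rcases List.cons_prefix_cons.mp hp with ⟨ha, hp2⟩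
        rcases List.cons_prefix_cons.mp hp2 with ⟨hb, _⟩
        exact absurd ⟨ha.symm, hb.symm⟩ hab
      · exact hi
    have := ih hbt
    simp only [pvRep, if_neg hab, List.length_cons] at this ⊢
    omega

-- the 'while "__" in code: code = code.replace("__", "_")' loop of A
def pvCollapse (code : List Char) : List Char :=
  if h : PySem.Chars.isIn ['_','_'] code then
    pvCollapse (PySem.Chars.replace code ['_','_'] ['_'])
  else code
termination_by code.length
decreasing_by
  rw [pvReplace_eq_rep]
  exact pvRep_len_lt _ ((PySem.Chars.isIn_iff_infix _ _).mp h)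

def derive_code_py (source : String) (family : String) : String :=
  let raw := PySem.Chars.upper (source.toList ++ '_' :: family.toList)
  let out := raw.foldl (fun acc c => acc ++ [if PySem.Chars.isalnum c then c else '_']) ([] : List Char)
  let code := pvCollapse out
  let stripped := PySem.Chars.stripChars code ['_']
  if stripped.isEmpty then "UNSPECIFIED" else String.mk stripped

-- ===== PORT B =====
-- one step of B's loop: grow the current alnum run, or flush it on a separator
def pvStep (st : List (List Char) × List Char) (ch : Char) : List (List Char) × List Char :=
  if PySem.Chars.isalnum ch then (st.1, st.2 ++ [ch])
  else if st.2.isEmpty then st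
  else (st.1 ++ [st.2], [])

def derive_code_py_alt (source : String) (family : String) : String :=
  let raw := PySem.Chars.upper (source.toList ++ '_' :: family.toList)
  let st := raw.foldl pvStep ([], [])
  let tokens := if st.2.isEmpty then st.1 else st.1 ++ [st.2]
  let r := PySem.Chars.join ['_'] tokens
  if r.isEmpty then "UNSPECIFIED" else String.mk r

-- ===== PRECONDITION & SPEC =====
def Spec_derive_code_py (source : String) (family : String) (out : String) : Prop := out = derive_code_py_alt source family
instance (source : String) (family : String) (out : String) : Decidable (Spec_derive_code_py source family out) := by unfold Spec_derive_code_py; infer_instance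

-- ===== CLAIM (what is proved, stated in full; the proofs are below) =====
def Claim_equal_derive_code_py : Prop := ∀ (source : String) (family : String), Dom_derive_code_py source family → Spec_derive_code_py source family (derive_code_py source family)

-- ===== LEMMAS AND PROOFS =====

-- the character substitution A performs
def pvF (c : Char) : Char := if PySem.Chars.isalnum c then c else '_'

-- collapse of adjacent '_' pairs, the fixed point of the replace loop
def pvSqueeze : List Char → List Char
  | [] => []
  | [c] => [c]
  | a :: b :: t => if a = '_' ∧ b = '_' then pvSqueeze (b :: t) else a :: pvSqueeze (b :: t)

-- substitute-then-squeeze fused: keep alnum chars, one '_' per separator run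
def pvG : List Char → List Char
  | [] => []
  | [c] => if PySem.Chars.isalnum c then [c] else ['_']
  | c :: d :: t =>
    if PySem.Chars.isalnum c then c :: pvG (d :: t)
    else if PySem.Chars.isalnum d then '_' :: pvG (d :: t)
    else pvG (d :: t)

-- the maximal alnum runs of a string
def pvToks : List Char → List (List Char)
  | [] => []
  | [c] => if PySem.Chars.isalnum c then [[c]] else []
  | c :: d :: t =>
    if PySem.Chars.isalnum c then
      if PySem.Chars.isalnum d then
        match pvToks (d :: t) with
        | g :: gs => (c :: g) :: gs
        | [] => [[c]]
      else [c] :: pvToks (d :: t)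
    else pvToks (d :: t)

def pvIc (ts : List (List Char)) : List Char := PySem.Chars.join ['_'] ts

def pvPre (s : List Char) : List Char :=
  if pvToks s = [] then [] else
  match s with
  | [] => []
  | c :: _ => if PySem.Chars.isalnum c then [] else ['_']

def pvSuf (s : List Char) : List Char :=
  match s.getLast? with
  | none => []
  | some c => if PySem.Chars.isalnum c then [] else ['_']

-- merging B's pending run into the tokens of the remaining input
def pvMer (cur : List Char) (s : List Char) : List (List Char) :=
  if cur = [] then pvToks s else
  match s with
  | [] => [cur]
  | c :: _ =>
    if PySem.Chars.isalnum c then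
      match pvToks s with
      | g :: gs => (cur ++ g) :: gs
      | [] => [cur]
    else cur :: pvToks s

theorem pvAl_ne_underscore {c : Char} (h : PySem.Chars.isalnum c = true) : c ≠ '_' := by
  rintro rfl
  exact absurd h (by decide)

theorem pvSqueeze_map (s : List Char) : pvSqueeze (s.map pvF) = pvG s := by
  induction s using pvG.induct with
  | case1 => simp [pvSqueeze, pvG]
  | case2 c h => simp [pvSqueeze, pvG, pvF, h]
  | case3 c h => simp [pvSqueeze, pvG, pvF, h]
  | case4 c d t hc ih =>
    have hfc : pvF c = c := if_pos hc
    have hne : ¬ (pvF c = '_' ∧ pvF d = '_') := by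
      rintro ⟨h1, -⟩
      exact pvAl_ne_underscore hc (hfc ▸ h1)
    simp only [List.map_cons]
    have l1 : pvSqueeze (pvF c :: pvF d :: t.map pvF) = pvF c :: pvSqueeze (pvF d :: t.map pvF) := by
      simp only [pvSqueeze, if_neg hne]
    rw [l1, show (pvF d :: t.map pvF) = (d :: t).map pvF from rfl, ih]
    simp [pvG, hc, hfc]
  | case5 c d t hc hd ih =>
    have hfc : pvF c = '_' := if_neg (by simp [hc])
    have hfd : pvF d = d := if_pos hd
    have hne : ¬ (pvF c = '_' ∧ pvF d = '_') := by
      rintro ⟨-, h2⟩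
      exact pvAl_ne_underscore hd (hfd ▸ h2)
    simp only [List.map_cons]
    have l1 : pvSqueeze (pvF c :: pvF d :: t.map pvF) = pvF c :: pvSqueeze (pvF d :: t.map pvF) := by
      simp only [pvSqueeze, if_neg hne]
    rw [l1, show (pvF d :: t.map pvF) = (d :: t).map pvF from rfl, ih]
    simp [pvG, hc, hd, hfc]
  | case6 c d t hc hd ih =>
    have hfc : pvF c = '_' := if_neg (by simp [hc])
    have hfd : pvF d = '_' := if_neg (by simp [hd])
    simp only [List.map_cons]
    have l1 : pvSqueeze (pvF c :: pvF d :: t.map pvF) = pvSqueeze (pvF d :: t.map pvF) := by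
      simp only [pvSqueeze, if_pos (And.intro hfc hfd)]
    rw [l1, show (pvF d :: t.map pvF) = (d :: t).map pvF from rfl, ih]
    simp [pvG, hc, hd]

theorem pvSqueeze_no_infix (s : List Char) (h : ¬ ['_','_'] <:+: s) : pvSqueeze s = s := by
  induction s using pvSqueeze.induct with
  | case1 => simp [pvSqueeze]
  | case2 c => simp [pvSqueeze]
  | case3 a b t hab ih =>
    exfalso
    obtain ⟨rfl, rfl⟩ := hab
    exact h ⟨[], t, rfl⟩
  | case4 a b t hab ih =>
    have h2 : ¬ ['_','_'] <:+: (b :: t) := fun hh => h (List.infix_cons_iff.mpr (Or.inr hh))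
    simp only [pvSqueeze, if_neg hab]
    rw [ih h2]

theorem pvSqueeze_cons_rep (n : Nat) : ∀ (s : List Char), s.length ≤ n → ∀ c,
    pvSqueeze (c :: pvRep s) = pvSqueeze (c :: s) := by
  induction n with
  | zero =>
    intro s h c
    have hs : s = [] := List.eq_nil_of_length_eq_zero (Nat.le_zero.mp h)
    subst hs
    simp [pvRep]
  | succ n ih =>
    intro s h c
    cases s with
    | nil => simp [pvRep]
    | cons a t =>
      cases t with
      | nil => simp [pvRep]
      | cons b t =>
        by_cases hab : a = '_' ∧ b = '_'
        · obtain ⟨rfl, rfl⟩ := hab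
          have hrep : pvRep ('_'::'_'::t) = '_' :: pvRep t := by simp [pvRep]
          rw [hrep]
          have hlen : t.length ≤ n := by simp only [List.length_cons] at h; omega
          by_cases hc : c = '_'
          · subst hc
            have l1 : pvSqueeze ('_'::'_'::pvRep t) = pvSqueeze ('_'::pvRep t) := by simp [pvSqueeze]
            have r1 : pvSqueeze ('_'::'_'::'_'::t) = pvSqueeze ('_'::'_'::t) := by simp [pvSqueeze]
            have r2 : pvSqueeze ('_'::'_'::t) = pvSqueeze ('_'::t) := by simp [pvSqueeze]
            rw [l1, r1, r2, ih t hlen '_']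
          · have l1 : pvSqueeze (c::'_'::pvRep t) = c :: pvSqueeze ('_'::pvRep t) := by
              simp [pvSqueeze, hc]
            have r1 : pvSqueeze (c::'_'::'_'::t) = c :: pvSqueeze ('_'::'_'::t) := by
              simp [pvSqueeze, hc]
            have r2 : pvSqueeze ('_'::'_'::t) = pvSqueeze ('_'::t) := by simp [pvSqueeze]
            rw [l1, r1, r2, ih t hlen '_']
        · have hrep : pvRep (a::b::t) = a :: pvRep (b::t) := by simp [pvRep, hab]
          rw [hrep]
          have key := ih (b::t) (by simp only [List.length_cons] at h ⊢; omega) a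
          by_cases hca : c = '_' ∧ a = '_'
          · have l1 : pvSqueeze (c::a::pvRep (b::t)) = pvSqueeze (a::pvRep (b::t)) := by
              simp [pvSqueeze, hca]
            have r1 : pvSqueeze (c::a::b::t) = pvSqueeze (a::b::t) := by simp [pvSqueeze, hca]
            rw [l1, r1, key]
          · have l1 : pvSqueeze (c::a::pvRep (b::t)) = c :: pvSqueeze (a::pvRep (b::t)) := by
              simp [pvSqueeze, hca]
            have r1 : pvSqueeze (c::a::b::t) = c :: pvSqueeze (a::b::t) := by simp [pvSqueeze, hca]
            rw [l1, r1, key]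

theorem pvSqueeze_rep (s : List Char) : pvSqueeze (pvRep s) = pvSqueeze s := by
  cases s with
  | nil => simp [pvRep]
  | cons a t =>
    cases t with
    | nil => simp [pvRep]
    | cons b t =>
      by_cases hab : a = '_' ∧ b = '_'
      · obtain ⟨rfl, rfl⟩ := hab
        have hrep : pvRep ('_'::'_'::t) = '_' :: pvRep t := by simp [pvRep]
        have r2 : pvSqueeze ('_'::'_'::t) = pvSqueeze ('_'::t) := by simp [pvSqueeze]
        rw [hrep, r2, pvSqueeze_cons_rep t.length t le_rfl '_']
      · have hrep : pvRep (a::b::t) = a :: pvRep (b::t) := by simp [pvRep, hab]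
        rw [hrep, pvSqueeze_cons_rep (b::t).length (b::t) le_rfl a]

theorem pvCollapse_eq_squeeze (s : List Char) : pvCollapse s = pvSqueeze s := by
  have main : ∀ n (s : List Char), s.length ≤ n → pvCollapse s = pvSqueeze s := by
    intro n
    induction n with
    | zero =>
      intro s h
      have hs : s = [] := List.eq_nil_of_length_eq_zero (Nat.le_zero.mp h)
      subst hs
      rw [pvCollapse.eq_def, dif_neg (by decide : ¬ PySem.Chars.isIn ['_','_'] ([]:List Char) = true)]
      simp [pvSqueeze]
    | succ n ih =>
      intro s h
      by_cases hin : PySem.Chars.isIn ['_','_'] s = true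
      · rw [pvCollapse.eq_def, dif_pos hin, pvReplace_eq_rep]
        have hlt := pvRep_len_lt s ((PySem.Chars.isIn_iff_infix _ _).mp hin)
        rw [ih (pvRep s) (by omega), pvSqueeze_rep]
      · rw [pvCollapse.eq_def, dif_neg hin]
        have hfalse : PySem.Chars.isIn ['_','_'] s = false := by simpa using hin
        exact (pvSqueeze_no_infix s ((PySem.Chars.isIn_eq_false_iff _ _).mp hfalse)).symm
  exact main s.length s le_rfl

theorem pvToks_cons_alnum (t : List Char) (d : Char) (h : PySem.Chars.isalnum d = true) :
    ∃ u gs, pvToks (d :: t) = (d :: u) :: gs := by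
  induction t generalizing d with
  | nil => exact ⟨[], [], by simp [pvToks, h]⟩
  | cons e t' ih =>
    by_cases he : PySem.Chars.isalnum e = true
    · obtain ⟨u, gs, hu⟩ := ih e he
      exact ⟨e :: u, gs, by simp only [pvToks, if_pos h, if_pos he, hu]⟩
    · exact ⟨[], pvToks (e :: t'), by simp [pvToks, h, he]⟩

theorem pvToks_skip (c : Char) (t : List Char) (h : ¬ PySem.Chars.isalnum c = true) :
    pvToks (c :: t) = pvToks t := by
  cases t with
  | nil => simp [pvToks, h]
  | cons d t' => simp [pvToks, h]

theorem pvToks_tok (s : List Char) : ∀ tok ∈ pvToks s, tok ≠ [] ∧ ∀ x ∈ tok, PySem.Chars.isalnum x = true := by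
  have main : ∀ n (s : List Char), s.length ≤ n →
      ∀ tok ∈ pvToks s, tok ≠ [] ∧ ∀ x ∈ tok, PySem.Chars.isalnum x = true := by
    intro n
    induction n with
    | zero =>
      intro s h tok htok
      have hs : s = [] := List.eq_nil_of_length_eq_zero (Nat.le_zero.mp h)
      subst hs
      simp [pvToks] at htok
    | succ n ih =>
      intro s h tok htok
      cases s with
      | nil => simp [pvToks] at htok
      | cons c t =>
        cases t with
        | nil =>
          by_cases hc : PySem.Chars.isalnum c = true
          · simp only [pvToks, if_pos hc, List.mem_singleton] at htok
            subst htok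
            exact ⟨by simp, by simpa using hc⟩
          · simp [pvToks, hc] at htok
        | cons d t' =>
          have hlen : (d :: t').length ≤ n := by simp only [List.length_cons] at h ⊢; omega
          by_cases hc : PySem.Chars.isalnum c = true
          · by_cases hd : PySem.Chars.isalnum d = true
            · obtain ⟨u, gs, hu⟩ := pvToks_cons_alnum t' d hd
              have htoks : pvToks (c :: d :: t') = (c :: d :: u) :: gs := by
                simp only [pvToks, if_pos hc, if_pos hd, hu]
              rw [htoks] at htok
              rcases List.mem_cons.mp htok with rfl | hmem
              · have hfst := ih (d :: t') hlen (d :: u) (by rw [hu]; simp)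
                refine ⟨by simp, ?_⟩
                intro x hx
                rcases List.mem_cons.mp hx with rfl | hx2
                · exact hc
                · exact hfst.2 x hx2
              · exact ih (d :: t') hlen tok (by rw [hu]; simp [hmem])
            · have htoks : pvToks (c :: d :: t') = [c] :: pvToks (d :: t') := by
                simp [pvToks, hc, hd]
              rw [htoks] at htok
              rcases List.mem_cons.mp htok with rfl | hmem
              · exact ⟨by simp, by simpa using hc⟩
              · exact ih (d :: t') hlen tok hmem
          · rw [pvToks_skip c (d :: t') hc] at htok
            exact ih (d :: t') hlen tok htok
  exact main s.length s le_rfl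

theorem pvG_eq (s : List Char) : pvG s = pvPre s ++ pvIc (pvToks s) ++ pvSuf s := by
  induction s using pvG.induct with
  | case1 => simp [pvG, pvToks, pvPre, pvSuf, pvIc, PySem.Chars.join_nil]
  | case2 c h => simp [pvG, pvToks, pvPre, pvSuf, pvIc, PySem.Chars.join_singleton, h]
  | case3 c h => simp [pvG, pvToks, pvPre, pvSuf, pvIc, PySem.Chars.join_nil, h]
  | case4 c d t hc ih =>
    have hG : pvG (c :: d :: t) = c :: pvG (d :: t) := by simp [pvG, hc]
    have hsuf : pvSuf (c :: d :: t) = pvSuf (d :: t) := by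
      simp [pvSuf, List.getLast?_cons_cons]
    by_cases hd : PySem.Chars.isalnum d = true
    · obtain ⟨u, gs, hu⟩ := pvToks_cons_alnum t d hd
      have htoks : pvToks (c :: d :: t) = (c :: d :: u) :: gs := by
        simp only [pvToks, if_pos hc, if_pos hd, hu]
      have hpre_s : pvPre (c :: d :: t) = [] := by simp [pvPre, htoks, hc]
      have hpre_t : pvPre (d :: t) = [] := by simp [pvPre, hu, hd]
      have hic : pvIc ((c :: d :: u) :: gs) = c :: pvIc ((d :: u) :: gs) := by
        cases gs with
        | nil => simp [pvIc, PySem.Chars.join_singleton]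
        | cons g' gs' => simp [pvIc, PySem.Chars.join_cons_cons]
      rw [hG, ih, hpre_t, htoks, hic, hpre_s, hu, hsuf]
      simp
    · have htoks : pvToks (c :: d :: t) = [c] :: pvToks (d :: t) := by
        simp [pvToks, hc, hd]
      have hpre_s : pvPre (c :: d :: t) = [] := by simp [pvPre, htoks, hc]
      rw [hG, ih, htoks, hpre_s, hsuf]
      cases hE : pvToks (d :: t) with
      | nil =>
        have hpre_t : pvPre (d :: t) = [] := by simp [pvPre, hE]
        rw [hpre_t]
        simp [pvIc, PySem.Chars.join_singleton, PySem.Chars.join_nil]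
      | cons g' gs' =>
        have hpre_t : pvPre (d :: t) = ['_'] := by simp [pvPre, hE, hd]
        have hic : pvIc ([c] :: g' :: gs') = c :: '_' :: pvIc (g' :: gs') := by
          simp [pvIc, PySem.Chars.join_cons_cons]
        rw [hpre_t, hic]
        simp
  | case5 c d t hc hd ih =>
    obtain ⟨u, gs, hu⟩ := pvToks_cons_alnum t d hd
    have htoks : pvToks (c :: d :: t) = pvToks (d :: t) := pvToks_skip c (d :: t) hc
    have hG : pvG (c :: d :: t) = '_' :: pvG (d :: t) := by simp [pvG, hc, hd]
    have hpre_s : pvPre (c :: d :: t) = ['_'] := by simp [pvPre, htoks, hu, hc]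
    have hpre_t : pvPre (d :: t) = [] := by simp [pvPre, hu, hd]
    have hsuf : pvSuf (c :: d :: t) = pvSuf (d :: t) := by
      simp [pvSuf, List.getLast?_cons_cons]
    rw [hG, ih, hpre_t, htoks, hpre_s, hsuf]
    simp
  | case6 c d t hc hd ih =>
    have htoks : pvToks (c :: d :: t) = pvToks (d :: t) := pvToks_skip c (d :: t) hc
    have hG : pvG (c :: d :: t) = pvG (d :: t) := by simp [pvG, hc, hd]
    have hsuf : pvSuf (c :: d :: t) = pvSuf (d :: t) := by
      simp [pvSuf, List.getLast?_cons_cons]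
    have hpre : pvPre (c :: d :: t) = pvPre (d :: t) := by
      cases hE : pvToks (d :: t) with
      | nil => simp [pvPre, htoks, hE]
      | cons g' gs' => simp [pvPre, htoks, hE, hc, hd]
    rw [hG, ih, hpre, htoks, hsuf]

theorem pvIc_head (ts : List (List Char))
    (h : ∀ tok ∈ ts, tok ≠ [] ∧ ∀ x ∈ tok, PySem.Chars.isalnum x = true) (hne : ts ≠ []) :
    ∃ c u, pvIc ts = c :: u ∧ PySem.Chars.isalnum c = true := by
  cases ts with
  | nil => exact absurd rfl hne
  | cons g gs =>
    obtain ⟨hg, hall⟩ := h g (by simp)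
    cases g with
    | nil => exact absurd rfl hg
    | cons c u =>
      cases gs with
      | nil => exact ⟨c, u, by simp [pvIc, PySem.Chars.join_singleton], hall c (by simp)⟩
      | cons g' gs' =>
        refine ⟨c, u ++ ['_'] ++ PySem.Chars.join ['_'] (g' :: gs'), ?_, hall c (by simp)⟩
        simp [pvIc, PySem.Chars.join_cons_cons]

theorem pvIc_last (ts : List (List Char))
    (h : ∀ tok ∈ ts, tok ≠ [] ∧ ∀ x ∈ tok, PySem.Chars.isalnum x = true) (hne : ts ≠ []) :
    ∃ c u, pvIc ts = u ++ [c] ∧ PySem.Chars.isalnum c = true := by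
  induction ts with
  | nil => exact absurd rfl hne
  | cons g gs ih =>
    cases gs with
    | nil =>
      obtain ⟨hg, hall⟩ := h g (by simp)
      refine ⟨g.getLast hg, g.dropLast, ?_, hall _ (List.getLast_mem hg)⟩
      rw [pvIc, PySem.Chars.join_singleton]
      exact (List.dropLast_append_getLast hg).symm
    | cons g' gs' =>
      obtain ⟨c, u, hu, hc⟩ := ih (fun tok ht => h tok (by simp [ht])) (by simp)
      refine ⟨c, g ++ '_' :: u, ?_, hc⟩
      rw [pvIc, PySem.Chars.join_cons_cons]
      rw [show PySem.Chars.join ['_'] (g' :: gs') = u ++ [c] from hu]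
      simp

theorem pvStrip_aux (pre suf m : List Char)
    (hpre : pre = [] ∨ pre = ['_']) (hsuf : suf = [] ∨ suf = ['_'])
    (hH : ∃ c u, m = c :: u ∧ c ≠ '_') (hL : ∃ c u, m = u ++ [c] ∧ c ≠ '_') :
    PySem.Chars.stripChars (pre ++ m ++ suf) ['_'] = m := by
  obtain ⟨c, u, hm, hc⟩ := hH
  obtain ⟨c', u', hm', hc'⟩ := hL
  have h1 : List.dropWhile (fun x => (['_'] : List Char).contains x) (pre ++ m ++ suf)
      = m ++ suf := by
    rcases hpre with rfl | rfl <;>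
      simp [hm, hc]
  have h2 : List.dropWhile (fun x => (['_'] : List Char).contains x) ((m ++ suf).reverse)
      = m.reverse := by
    have hmr : m.reverse = c' :: u'.reverse := by rw [hm']; simp
    rcases hsuf with rfl | rfl <;>
      simp [List.reverse_append, hmr, hc']
  show (List.dropWhile _ (List.dropWhile _ (pre ++ m ++ suf)).reverse).reverse = m
  rw [h1, h2, List.reverse_reverse]

theorem pvStrip_G (s : List Char) :
    PySem.Chars.stripChars (pvG s) ['_'] = pvIc (pvToks s) := by
  have hpre : pvPre s = [] ∨ pvPre s = ['_'] := by
    cases s with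
    | nil => left; simp [pvPre]
    | cons c r =>
      by_cases h1 : pvToks (c :: r) = []
      · left; simp [pvPre, h1]
      · by_cases h2 : PySem.Chars.isalnum c = true
        · left; simp [pvPre, h1, h2]
        · right; simp [pvPre, h1, h2]
  have hsuf : pvSuf s = [] ∨ pvSuf s = ['_'] := by
    cases hE : s.getLast? with
    | none => left; simp [pvSuf, hE]
    | some c =>
      by_cases h2 : PySem.Chars.isalnum c = true
      · left; simp [pvSuf, hE, h2]
      · right; simp [pvSuf, hE, h2]
  by_cases hE : pvToks s = []
  · have hpre0 : pvPre s = [] := by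
      cases s with
      | nil => simp [pvPre]
      | cons c r => simp [pvPre, hE]
    have hic : pvIc ([] : List (List Char)) = [] := by simp [pvIc, PySem.Chars.join_nil]
    rw [pvG_eq s, hE, hpre0, hic]
    rcases hsuf with h | h <;> rw [h] <;> decide
  · have hH := pvIc_head (pvToks s) (pvToks_tok s) hE
    have hL := pvIc_last (pvToks s) (pvToks_tok s) hE
    rw [pvG_eq s]
    refine pvStrip_aux _ _ _ hpre hsuf ?_ ?_
    · obtain ⟨c, u, h1, h2⟩ := hH
      exact ⟨c, u, h1, pvAl_ne_underscore h2⟩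
    · obtain ⟨c, u, h1, h2⟩ := hL
      exact ⟨c, u, h1, pvAl_ne_underscore h2⟩

theorem pvMer_alnum (cur : List Char) (c : Char) (t : List Char)
    (h : PySem.Chars.isalnum c = true) : pvMer (cur ++ [c]) t = pvMer cur (c :: t) := by
  cases t with
  | nil => cases cur <;> simp [pvMer, pvToks, h]
  | cons d t' =>
    by_cases hd : PySem.Chars.isalnum d = true
    · obtain ⟨u, gs, hu⟩ := pvToks_cons_alnum t' d hd
      have htoks : pvToks (c :: d :: t') = (c :: d :: u) :: gs := by
        simp only [pvToks, if_pos h, if_pos hd, hu]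
      cases cur <;> simp [pvMer, hu, htoks, h, hd]
    · have htoks : pvToks (c :: d :: t') = [c] :: pvToks (d :: t') := by
        simp [pvToks, h, hd]
      cases cur <;> simp [pvMer, htoks, h, hd]

theorem pvFold (s : List Char) : ∀ (done : List (List Char)) (cur : List Char),
    (let st := s.foldl pvStep (done, cur);
     if st.2.isEmpty then st.1 else st.1 ++ [st.2]) = done ++ pvMer cur s := by
  induction s with
  | nil =>
    intro done cur
    cases cur with
    | nil => simp [pvMer, pvToks]
    | cons x xs => simp [pvMer]
  | cons c t ih =>
    intro done cur
    simp only [List.foldl_cons]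
    by_cases hc : PySem.Chars.isalnum c = true
    · have hstep : pvStep (done, cur) c = (done, cur ++ [c]) := by simp [pvStep, hc]
      rw [hstep, ih done (cur ++ [c]), pvMer_alnum cur c t hc]
    · cases cur with
      | nil =>
        have hstep : pvStep (done, ([] : List Char)) c = (done, []) := by simp [pvStep, hc]
        rw [hstep, ih done []]
        simp [pvMer, pvToks_skip c t hc]
      | cons x xs =>
        have hstep : pvStep (done, x :: xs) c = (done ++ [x :: xs], []) := by
          simp [pvStep, hc]
        rw [hstep, ih (done ++ [x :: xs]) []]
        have h1 : pvMer [] t = pvToks t := by simp [pvMer]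
        have h2 : pvMer (x :: xs) (c :: t) = (x :: xs) :: pvToks (c :: t) := by
          simp [pvMer, hc]
        rw [h1, h2, pvToks_skip c t hc]
        simp

-- ===== VERDICT (by name: the statement is the Claim_ definition above) =====
theorem derive_code_py_spec : Claim_equal_derive_code_py := by
  intro source family _
  unfold Spec_derive_code_py derive_code_py derive_code_py_alt
  have hA : ∀ raw : List Char,
      List.foldl (fun acc c => acc ++ [if PySem.Chars.isalnum c then c else '_']) [] raw
        = raw.map pvF := by
    intro raw
    have := PySem.List.foldl_append_singleton_eq_map pvF raw []
    simpa [pvF] using this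
  have hB : ∀ raw : List Char,
      (if (List.foldl pvStep ([], []) raw).2.isEmpty
        then (List.foldl pvStep ([], []) raw).1
        else (List.foldl pvStep ([], []) raw).1 ++ [(List.foldl pvStep ([], []) raw).2])
        = pvToks raw := by
    intro raw
    have := pvFold raw [] []
    simpa [pvMer] using this
  have hstrip : ∀ raw : List Char,
      PySem.Chars.stripChars (pvCollapse (raw.map pvF)) ['_'] = pvIc (pvToks raw) := by
    intro raw
    rw [pvCollapse_eq_squeeze, pvSqueeze_map, pvStrip_G]
  dsimp only
  rw [hA, hstrip, hB]
  rfl
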